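-- pv_equiv track=rewrite | github.com/aronsa/registrar | basic/main.py | get_class_rooms_and_times
-- ===== SOURCE A (Python) =====
-- def get_class_rooms_and_times(class_num, roomSchedules):
--     class_rooms = []
--     class_times = []
--
--     for i in range(class_num+1):
--         for j in range(len(roomSchedules)):
--             if i in roomSchedules[j]:
--                 class_rooms.append(roomSchedules[j].index(i) + 1)
--                 class_times.append(j+1)
--     return class_rooms, class_times
-- ===== SOURCE B (Python) =====
-- def get_class_rooms_and_times(class_num, roomSchedules):
--     # One grouping pass builds an index: value -> [(first_pos+1, room_no), ...] in room order.
--     index = {}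
--     for j, room in enumerate(roomSchedules):
--         firstpos = {}
--         for pos, v in enumerate(room, 1):
--             firstpos.setdefault(v, pos)
--         for v, p in firstpos.items():
--             index.setdefault(v, []).append((p, j + 1))
--     class_rooms = []
--     class_times = []
--     for v in sorted(k for k in index if 0 <= k <= class_num):
--         for p, r in index[v]:
--             class_rooms.append(p)
--             class_times.append(r)
--     return class_rooms, class_times
-- ===== Notes on version B (the rewrite author's own statement) =====
-- stated objective: faster
-- what changed: Instead of scanning every room twice (membership test plus .index) for each id in range(class_num+1), B makes one grouping pass that records each room's first occurrence of every value into an index dict, then emits the in-range ids in sorted order straight from that index.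
import Mathlib
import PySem

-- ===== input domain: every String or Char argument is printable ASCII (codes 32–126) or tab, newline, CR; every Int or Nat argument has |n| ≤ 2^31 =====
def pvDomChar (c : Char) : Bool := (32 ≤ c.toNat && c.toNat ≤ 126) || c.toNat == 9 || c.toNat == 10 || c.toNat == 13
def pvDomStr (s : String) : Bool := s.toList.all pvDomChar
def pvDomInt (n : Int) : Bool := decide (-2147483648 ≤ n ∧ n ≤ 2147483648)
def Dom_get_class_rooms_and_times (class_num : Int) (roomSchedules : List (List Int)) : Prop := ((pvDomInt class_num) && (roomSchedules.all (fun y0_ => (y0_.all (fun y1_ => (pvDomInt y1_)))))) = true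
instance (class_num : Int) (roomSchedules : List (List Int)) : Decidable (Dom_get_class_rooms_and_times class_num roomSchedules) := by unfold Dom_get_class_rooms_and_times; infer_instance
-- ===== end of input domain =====

-- B replaces A's per-id nested scans (membership test plus a rescanning .index per room) by one
-- grouping pass that indexes each room's first occurrences, then emits the in-range ids in sorted
-- order from that index.

-- ===== PORT A =====
def get_class_rooms_and_times (class_num : Int) (roomSchedules : List (List Int)) : List Int × List Int :=
  (PySem.List.pyRange 0 (class_num + 1) 1).foldl (fun st i =>
    (PySem.List.pyRange 0 (roomSchedules.length : Int) 1).foldl (fun st2 j =>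
      if (PySem.List.pyGetD roomSchedules j []).contains i then
        (st2.1 ++ [(((PySem.List.index? (PySem.List.pyGetD roomSchedules j []) i).getD 0 : Nat) : Int) + 1],
         st2.2 ++ [j + 1])
      else st2) st) ([], [])

-- ===== PORT B =====
def get_class_rooms_and_times_alt (class_num : Int) (roomSchedules : List (List Int)) : List Int × List Int :=
  let index : PySem.Dict Int (List (Int × Int)) :=
    (PySem.List.enumerate roomSchedules 0).foldl (fun idx jr =>
      (((PySem.List.enumerate jr.2 1).foldl (fun fp pv => fp.setdefault pv.2 pv.1)
          (PySem.Dict.empty : PySem.Dict Int Int)).items).foldl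
        (fun idx2 vp => idx2.modify vp.1 [] (· ++ [(vp.2, jr.1 + 1)])) idx)
      PySem.Dict.empty
  let ks := PySem.List.sorted ((index.keys).filter (fun k => decide (0 ≤ k ∧ k ≤ class_num))) (fun x => x)
  ks.foldl (fun st v =>
    (index.getD v []).foldl (fun st2 pr => (st2.1 ++ [pr.1], st2.2 ++ [pr.2])) st) ([], [])

-- ===== PRECONDITION & SPEC =====
def Spec_get_class_rooms_and_times (class_num : Int) (roomSchedules : List (List Int)) (out : List Int × List Int) : Prop := out = get_class_rooms_and_times_alt class_num roomSchedules
instance (class_num : Int) (roomSchedules : List (List Int)) (out : List Int × List Int) : Decidable (Spec_get_class_rooms_and_times class_num roomSchedules out) := by unfold Spec_get_class_rooms_and_times; infer_instance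

-- ===== CLAIM (what is proved, stated in full; the proofs are below) =====
def Claim_equal_get_class_rooms_and_times : Prop := ∀ (class_num : Int) (roomSchedules : List (List Int)), Dom_get_class_rooms_and_times class_num roomSchedules → Spec_get_class_rooms_and_times class_num roomSchedules (get_class_rooms_and_times class_num roomSchedules)

-- ===== LEMMAS AND PROOFS =====

-- the (first_position+1, room_number+1) entry a pair (room_index, room) contributes for id v
def pvEnt (v : Int) (p : Int × List Int) : Int × Int :=
  ((((PySem.List.index? p.2 v).getD 0 : Nat) : Int) + 1, p.1 + 1)

-- all entries id v collects from rooms rs enumerated from s, in room order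
def pvG (s : Int) (rs : List (List Int)) (v : Int) : List (Int × Int) :=
  ((PySem.List.enumerate rs s).filter (fun p => p.2.contains v)).map (pvEnt v)

-- B's index-building loop, generalized over the enumeration start and the accumulator dict
def pvBuild (s : Int) (rs : List (List Int)) (d : PySem.Dict Int (List (Int × Int))) :
    PySem.Dict Int (List (Int × Int)) :=
  (PySem.List.enumerate rs s).foldl (fun idx jr =>
    (((PySem.List.enumerate jr.2 1).foldl (fun fp pv => fp.setdefault pv.2 pv.1)
        (PySem.Dict.empty : PySem.Dict Int Int)).items).foldl
      (fun idx2 vp => idx2.modify vp.1 [] (· ++ [(vp.2, jr.1 + 1)])) idx) d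

-- the per-room firstpos dict of B
def pvFP (room : List Int) : PySem.Dict Int Int :=
  (PySem.List.enumerate room 1).foldl (fun fp pv => fp.setdefault pv.2 pv.1) PySem.Dict.empty

lemma pvFP_get? : ∀ (room : List Int) (s : Int) (d : PySem.Dict Int Int) (v : Int),
    ((PySem.List.enumerate room s).foldl (fun fp pv => fp.setdefault pv.2 pv.1) d).get? v
      = (d.get? v).or ((PySem.List.index? room v).map (fun k => s + (k : Int))) := by
  intro room
  induction room with
  | nil => intro s d v; simp [PySem.List.enumerate]
  | cons x xs ih =>
    intro s d v
    rw [PySem.List.enumerate_cons]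
    simp only [List.foldl_cons]
    rw [ih]
    by_cases hv : v = x
    · subst hv
      rw [PySem.Dict.get?_setdefault_self, PySem.List.index?_cons_self]
      cases h : d.get? v <;> simp [Option.or]
    · rw [PySem.Dict.get?_setdefault_of_ne _ _ hv, PySem.List.index?_cons_of_ne _ (fun h => hv h.symm)]
      cases h : PySem.List.index? xs v <;> cases h2 : d.get? v <;>
        simp [Option.or, add_comm, add_left_comm]

lemma pv_keys_add (d : PySem.Dict Int Int) (x : Int) :
    (if d.contains x = true then d.keys else d.keys ++ [x]) = PySem.Set.add d.keys x := by
  have h : d.contains x = (PySem.Set.contains d.keys x) := by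
    by_cases h : d.contains x = true
    · simp [h, PySem.Set.contains, ((PySem.Dict.contains_iff_mem_keys d x).mp h)]
    · simp only [Bool.not_eq_true] at h
      simp [h, PySem.Set.contains]
      intro hm
      exact absurd ((PySem.Dict.contains_iff_mem_keys d x).mpr hm) (by simp [h])
  rw [h, PySem.Set.add]

lemma pvFP_keys : ∀ (room : List Int) (s : Int) (d : PySem.Dict Int Int),
    ((PySem.List.enumerate room s).foldl (fun fp pv => fp.setdefault pv.2 pv.1) d).keys
      = PySem.Set.update d.keys room := by
  intro room
  induction room with
  | nil => intro s d; simp [PySem.List.enumerate, PySem.Set.update]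
  | cons x xs ih =>
    intro s d
    rw [PySem.List.enumerate_cons]
    simp only [List.foldl_cons]
    rw [ih]
    show _ = PySem.Set.update (PySem.Set.add d.keys x) xs
    congr 1
    rw [PySem.Dict.keys_setdefault]
    exact pv_keys_add d x

lemma pvFP_items (room : List Int) :
    (pvFP room).items
      = (PySem.Set.ofList room).map
          (fun v => (v, (((PySem.List.index? room v).getD 0 : Nat) : Int) + 1)) := by
  have hkeys : (pvFP room).keys = PySem.Set.ofList room := by
    rw [pvFP, pvFP_keys]
    simp [PySem.Set.update, PySem.Set.ofList_eq_foldl, PySem.Dict.keys]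
    rfl
  have hnd : (pvFP room).keys.Nodup := by rw [hkeys]; exact PySem.Set.nodup_ofList room
  rw [PySem.Dict.items_eq_map_keys _ hnd 0, hkeys]
  apply List.map_congr_left
  intro v hv
  have hvmem : v ∈ room := (PySem.Set.mem_ofList room v).mp hv
  have hidx : (PySem.List.index? room v).isSome := (PySem.List.index?_isSome_iff room v).mpr hvmem
  obtain ⟨k, hk⟩ := Option.isSome_iff_exists.mp hidx
  have hg : (pvFP room).get? v = some (1 + (k : Int)) := by
    rw [pvFP, pvFP_get?, PySem.Dict.get?_empty, hk]; rfl
  rw [PySem.Dict.getD_eq_get?_getD, hg, hk]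
  simp; ring

lemma pv_filter_map_nodup {β : Type} : ∀ (ks : List Int), ks.Nodup → ∀ (f : Int → β) (c : Int),
    ((ks.map (fun v => (v, f v))).filter (fun p => p.1 == c)).map (fun x => x.2)
      = if c ∈ ks then [f c] else [] := by
  intro ks
  induction ks with
  | nil => simp
  | cons x xs ih =>
    intro hnd f c
    simp only [List.map_cons, List.filter_cons]
    by_cases hc : x = c
    · subst hc
      have hni : x ∉ xs := (List.nodup_cons.mp hnd).1
      have hfil : (xs.map (fun v => (v, f v))).filter (fun p => p.1 == x) = [] := by
        rw [List.filter_eq_nil_iff]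
        intro p hp
        simp only [List.mem_map] at hp
        obtain ⟨v, hv, rfl⟩ := hp
        simp
        exact fun h => absurd (h ▸ hv) hni
      simp [hfil]
    · simp [hc, ih (List.nodup_cons.mp hnd).2 f c, Ne.symm hc]

lemma pvStep_getD (room : List Int) (j : Int) (d : PySem.Dict Int (List (Int × Int))) (v : Int) :
    ((pvFP room).items.foldl (fun idx2 vp => idx2.modify vp.1 [] (· ++ [(vp.2, j + 1)])) d).getD v []
    = d.getD v [] ++ (if room.contains v then [pvEnt v (j, room)] else []) := by
  rw [pvFP_items]
  rw [List.foldl_map]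
  have h2 : ((PySem.Set.ofList room).map
        (fun w => (w, ((((PySem.List.index? room w).getD 0 : Nat) : Int) + 1, j + 1)))).foldl
        (fun (idx2 : PySem.Dict Int (List (Int × Int))) p => idx2.modify p.1 [] (· ++ [p.2])) d
      = (PySem.Set.ofList room).foldl
        (fun idx2 w => idx2.modify w []
          (· ++ [(((((PySem.List.index? room w).getD 0 : Nat) : Int)) + 1, j + 1)])) d := by
    rw [List.foldl_map]
  rw [← h2, PySem.Dict.getD_foldl_modify_append,
    pv_filter_map_nodup _ (PySem.Set.nodup_ofList room) _ v]
  congr 1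
  by_cases hv : v ∈ room
  · simp [hv, (PySem.Set.mem_ofList room v).mpr hv, pvEnt]
  · simp [hv]

lemma pvStep_keys (room : List Int) (j : Int) (d : PySem.Dict Int (List (Int × Int))) :
    ((pvFP room).items.foldl (fun idx2 vp => idx2.modify vp.1 [] (· ++ [(vp.2, j + 1)])) d).keys
    = PySem.Set.update d.keys (PySem.Set.ofList room) := by
  rw [PySem.Dict.keys_foldl_modify_key (pvFP room).items (fun (x : Int × Int) => x.1) []
      (fun _ (x : Int × Int) => (· ++ [(x.2, j + 1)])) d]
  congr 1
  rw [pvFP_items, List.map_map]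
  simp [Function.comp_def]

lemma pvStep_nodup (room : List Int) (j : Int) (d : PySem.Dict Int (List (Int × Int)))
    (h : d.keys.Nodup) :
    ((pvFP room).items.foldl (fun idx2 vp => idx2.modify vp.1 [] (· ++ [(vp.2, j + 1)])) d).keys.Nodup :=
  PySem.Dict.nodup_keys_foldl_modify_key (pvFP room).items (fun (x : Int × Int) => x.1) []
    (fun _ (x : Int × Int) => (· ++ [(x.2, j + 1)])) d h

lemma pvBuild_cons (room : List Int) (rest : List (List Int)) (s : Int)
    (d : PySem.Dict Int (List (Int × Int))) :
    pvBuild s (room :: rest) d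
      = pvBuild (s + 1) rest
          ((pvFP room).items.foldl (fun idx2 vp => idx2.modify vp.1 [] (· ++ [(vp.2, s + 1)])) d) := by
  simp only [pvBuild, pvFP, PySem.List.enumerate_cons, List.foldl_cons]

lemma pvBuild_getD : ∀ (rs : List (List Int)) (s : Int) (d : PySem.Dict Int (List (Int × Int))) (v : Int),
    (pvBuild s rs d).getD v [] = d.getD v [] ++ pvG s rs v := by
  intro rs
  induction rs with
  | nil => intro s d v; simp [pvBuild, pvG, PySem.List.enumerate]
  | cons room rest ih =>
    intro s d v
    rw [pvBuild_cons, ih, pvStep_getD]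
    have h : pvG s (room :: rest) v
        = (if room.contains v then [pvEnt v (s, room)] else []) ++ pvG (s + 1) rest v := by
      rw [pvG, pvG, PySem.List.enumerate_cons, List.filter_cons]
      by_cases h : v ∈ room <;> simp [h]
    rw [h, List.append_assoc]

lemma pvBuild_keys_mem : ∀ (rs : List (List Int)) (s : Int) (d : PySem.Dict Int (List (Int × Int))) (v : Int),
    v ∈ (pvBuild s rs d).keys ↔ v ∈ d.keys ∨ ∃ room ∈ rs, v ∈ room := by
  intro rs
  induction rs with
  | nil => intro s d v; simp [pvBuild, PySem.List.enumerate]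
  | cons room rest ih =>
    intro s d v
    rw [pvBuild_cons, ih, pvStep_keys, PySem.Set.mem_update, PySem.Set.mem_ofList]
    constructor
    · rintro (⟨h | h⟩ | ⟨r, hr, hv⟩)
      · exact Or.inl h
      · exact Or.inr ⟨room, List.mem_cons_self, h⟩
      · exact Or.inr ⟨r, List.mem_cons_of_mem _ hr, hv⟩
    · rintro (h | ⟨r, hr, hv⟩)
      · exact Or.inl (Or.inl h)
      · rcases List.mem_cons.mp hr with rfl | hr'
        · exact Or.inl (Or.inr hv)
        · exact Or.inr ⟨r, hr', hv⟩

lemma pvBuild_keys_nodup : ∀ (rs : List (List Int)) (s : Int) (d : PySem.Dict Int (List (Int × Int))),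
    d.keys.Nodup → (pvBuild s rs d).keys.Nodup := by
  intro rs
  induction rs with
  | nil => intro s d h; simpa [pvBuild, PySem.List.enumerate] using h
  | cons room rest ih =>
    intro s d h
    rw [pvBuild_cons]
    exact ih _ _ (pvStep_nodup room s d h)

lemma pvG_ne_nil (s : Int) (rs : List (List Int)) (v : Int) :
    pvG s rs v ≠ [] ↔ ∃ room ∈ rs, v ∈ room := by
  rw [pvG]
  simp only [ne_eq, List.map_eq_nil_iff, List.filter_eq_nil_iff, not_forall]
  constructor
  · rintro ⟨p, hp, hc⟩
    refine ⟨p.2, ?_, by simpa using hc⟩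
    obtain ⟨k, hk, rfl⟩ := (PySem.List.mem_enumerate_iff rs s p).mp hp
    exact List.getElem_mem hk
  · rintro ⟨room, hr, hv⟩
    obtain ⟨k, hk, rfl⟩ := List.mem_iff_getElem.mp hr
    exact ⟨(s + k, rs[k]), (PySem.List.mem_enumerate_iff rs s _).mpr ⟨k, hk, rfl⟩, by simpa using hv⟩

lemma pv_flatMap_filter {α β : Type} (p : α → Bool) (f : α → List β) :
    ∀ (l : List α), (∀ x ∈ l, p x = false → f x = []) →
    (l.filter p).flatMap f = l.flatMap f := by
  intro l
  induction l with
  | nil => simp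
  | cons x xs ih =>
    intro h
    rw [List.filter_cons]
    by_cases hp : p x = true
    · simp [hp, ih (fun y hy => h y (List.mem_cons_of_mem x hy))]
    · simp only [Bool.not_eq_true] at hp
      simp [hp, h x (List.mem_cons_self) hp, ih (fun y hy => h y (List.mem_cons_of_mem x hy))]

lemma pvA_eq (class_num : Int) (rs : List (List Int)) :
    get_class_rooms_and_times class_num rs
      = (((PySem.List.pyRange 0 (class_num + 1) 1).flatMap (fun i => pvG 0 rs i)).map Prod.fst,
         ((PySem.List.pyRange 0 (class_num + 1) 1).flatMap (fun i => pvG 0 rs i)).map Prod.snd) := by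
  have hg : ∀ i : Int, pvG 0 rs i
      = ((PySem.List.pyRange 0 (rs.length : Int) 1).filter
          (fun j => (PySem.List.pyGetD rs j []).contains i)).map
          (fun j => ((((PySem.List.index? (PySem.List.pyGetD rs j []) i).getD 0 : Nat) : Int) + 1, j + 1)) := by
    intro i
    rw [pvG, PySem.List.enumerate_eq_map_pyRange rs [], List.filter_map, List.map_map,
      PySem.List.len_eq]
    rfl
  have hinner : ∀ (st : List Int × List Int) (i : Int),
      (PySem.List.pyRange 0 (rs.length : Int) 1).foldl (fun st2 j =>
        if (PySem.List.pyGetD rs j []).contains i then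
          (st2.1 ++ [(((PySem.List.index? (PySem.List.pyGetD rs j []) i).getD 0 : Nat) : Int) + 1],
           st2.2 ++ [j + 1])
        else st2) st
      = (st.1 ++ (pvG 0 rs i).map Prod.fst, st.2 ++ (pvG 0 rs i).map Prod.snd) := by
    intro st i
    obtain ⟨s1, s2⟩ := st
    have hb : (fun (st2 : List Int × List Int) (j : Int) =>
        if (PySem.List.pyGetD rs j []).contains i then
          (st2.1 ++ [(((PySem.List.index? (PySem.List.pyGetD rs j []) i).getD 0 : Nat) : Int) + 1],
           st2.2 ++ [j + 1])
        else st2)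
      = (fun st2 j =>
          (if (PySem.List.pyGetD rs j []).contains i then
            st2.1 ++ [(((PySem.List.index? (PySem.List.pyGetD rs j []) i).getD 0 : Nat) : Int) + 1]
           else st2.1,
           if (PySem.List.pyGetD rs j []).contains i then st2.2 ++ [j + 1] else st2.2)) := by
      funext st2 j
      split <;> rfl
    rw [hb, PySem.List.foldl_prod_mk
        (fun (a : List Int) (j : Int) =>
          if (PySem.List.pyGetD rs j []).contains i = true then
            a ++ [(((PySem.List.index? (PySem.List.pyGetD rs j []) i).getD 0 : Nat) : Int) + 1]
          else a)
        (fun (b : List Int) (j : Int) =>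
          if (PySem.List.pyGetD rs j []).contains i = true then b ++ [j + 1] else b)
        (PySem.List.pyRange 0 (rs.length : Int) 1) s1 s2,
      PySem.List.foldl_append_if, PySem.List.foldl_append_if,
      hg i, List.map_map, List.map_map]
    rfl
  show List.foldl _ ([], []) _ = _
  simp only [hinner]
  rw [PySem.List.foldl_prod_mk
      (fun (a : List Int) (i : Int) => a ++ (pvG 0 rs i).map Prod.fst)
      (fun (b : List Int) (i : Int) => b ++ (pvG 0 rs i).map Prod.snd)
      (PySem.List.pyRange 0 (class_num + 1) 1) [] [],
    PySem.List.foldl_append_eq_flatMap, PySem.List.foldl_append_eq_flatMap,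
    List.map_flatMap, List.map_flatMap]
  rfl

lemma pvB_eq (class_num : Int) (rs : List (List Int)) :
    get_class_rooms_and_times_alt class_num rs
      = ((((PySem.List.sorted (((pvBuild 0 rs PySem.Dict.empty).keys).filter
              (fun k => decide (0 ≤ k ∧ k ≤ class_num))) (fun x => x))).flatMap
            (fun v => pvG 0 rs v)).map Prod.fst,
         (((PySem.List.sorted (((pvBuild 0 rs PySem.Dict.empty).keys).filter
              (fun k => decide (0 ≤ k ∧ k ≤ class_num))) (fun x => x))).flatMap
            (fun v => pvG 0 rs v)).map Prod.snd) := by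
  show (PySem.List.sorted (((pvBuild 0 rs PySem.Dict.empty).keys).filter
          (fun k => decide (0 ≤ k ∧ k ≤ class_num))) (fun x => x)).foldl
        (fun st v => ((pvBuild 0 rs PySem.Dict.empty).getD v []).foldl
          (fun st2 pr => (st2.1 ++ [pr.1], st2.2 ++ [pr.2])) st) ([], []) = _
  have hG : ∀ v, (pvBuild 0 rs PySem.Dict.empty).getD v [] = pvG 0 rs v := by
    intro v; rw [pvBuild_getD, PySem.Dict.getD_empty]; rfl
  have hinner : ∀ (st : List Int × List Int) (v : Int),
      ((pvBuild 0 rs PySem.Dict.empty).getD v []).foldl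
        (fun st2 pr => (st2.1 ++ [pr.1], st2.2 ++ [pr.2])) st
      = (st.1 ++ (pvG 0 rs v).map Prod.fst, st.2 ++ (pvG 0 rs v).map Prod.snd) := by
    intro st v
    obtain ⟨s1, s2⟩ := st
    rw [hG, PySem.List.foldl_prod_mk
        (fun (a : List Int) (pr : Int × Int) => a ++ [pr.1])
        (fun (b : List Int) (pr : Int × Int) => b ++ [pr.2])
        (pvG 0 rs v) s1 s2,
      PySem.List.foldl_append_singleton_eq_map, PySem.List.foldl_append_singleton_eq_map]
  simp only [hinner]
  rw [PySem.List.foldl_prod_mk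
      (fun (a : List Int) (v : Int) => a ++ (pvG 0 rs v).map Prod.fst)
      (fun (b : List Int) (v : Int) => b ++ (pvG 0 rs v).map Prod.snd)
      _ [] [],
    PySem.List.foldl_append_eq_flatMap, PySem.List.foldl_append_eq_flatMap,
    List.map_flatMap, List.map_flatMap]
  rfl

lemma pv_keys_sorted (class_num : Int) (rs : List (List Int)) :
    PySem.List.sorted (((pvBuild 0 rs PySem.Dict.empty).keys).filter
        (fun k => decide (0 ≤ k ∧ k ≤ class_num))) (fun x => x)
      = (PySem.List.pyRange 0 (class_num + 1) 1).filter (fun i => !(pvG 0 rs i).isEmpty) := by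
  apply PySem.List.sorted_eq_of_perm_of_pairwise_lt
  · rw [List.perm_ext_iff_of_nodup
      (List.Nodup.filter _ (PySem.List.nodup_pyRange_one 0 (class_num + 1)))
      (List.Nodup.filter _ (pvBuild_keys_nodup rs 0 PySem.Dict.empty PySem.Dict.nodup_keys_empty))]
    intro a
    rw [List.mem_filter, List.mem_filter, PySem.List.mem_pyRange_one,
      pvBuild_keys_mem, PySem.Dict.keys_empty]
    constructor
    · rintro ⟨⟨h0, h1⟩, hne⟩
      simp only [Bool.not_eq_true', List.isEmpty_eq_false_iff] at hne
      exact ⟨Or.inr ((pvG_ne_nil 0 rs a).mp hne), by simp; omega⟩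
    · rintro ⟨h, hb⟩
      simp only [decide_eq_true_eq] at hb
      rcases h with h | h
      · simp at h
      · refine ⟨⟨hb.1, by omega⟩, ?_⟩
        simp only [Bool.not_eq_true', List.isEmpty_eq_false_iff]
        exact (pvG_ne_nil 0 rs a).mpr h
  · exact List.Pairwise.filter _ (PySem.List.pairwise_lt_pyRange_one 0 (class_num + 1))

-- ===== VERDICT (by name: the statement is the Claim_ definition above) =====
theorem get_class_rooms_and_times_spec : Claim_equal_get_class_rooms_and_times := by
  intro class_num rs _
  show _ = _
  rw [pvA_eq, pvB_eq, pv_keys_sorted,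
    pv_flatMap_filter (fun i => !(pvG 0 rs i).isEmpty) (fun i => pvG 0 rs i)
      (PySem.List.pyRange 0 (class_num + 1) 1)
      (by intro x _ h; simpa using h)]
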